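-- pv_equiv track=rewrite | github.com/iamprakhargupta/Coding-Questions | pickupcoupons_google.py | min_cost_to_win
-- ===== SOURCE A (Python) =====
-- from typing import List
--
-- def min_cost_to_win(nums: List[int]) -> int:
--     # WRITE YOUR BRILLIANT CODE HERE
--     d = {}
--     flag = 0
--     mini = len(nums)
--
--     def mindiff(l):
--         p = []
--         for i in range(len(l) - 1):
--             p.append(abs(l[i + 1] - l[i]))
--         return min(p)
--
--     for i in range(len(nums)):
--         if nums[i] in d:
--             d[nums[i]].append(i)
--         else:
--             d[nums[i]] = [i]
--     for k, v in d.items():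
--         if len(v) > 1:
--             flag = 1
--             x = mindiff(v)
--             if x < mini:
--                 mini = x
--
--     if flag == 1:
--
--         return mini + 1
--     else:
--         return -1
-- ===== SOURCE B (Python) =====
-- from typing import List
--
-- def min_cost_to_win(nums: List[int]) -> int:
--     # One pass: remember the last index of each value, keep the smallest gap seen.
--     last = {}
--     best = None
--     for i, x in enumerate(nums):
--         if x in last:
--             g = i - last[x]
--             if best is None or g < best:
--                 best = g
--         last[x] = i
--     return -1 if best is None else best + 1
-- ===== Notes on version B (the rewrite author's own statement) =====
-- stated objective: simpler
-- what changed: A groups all indices per value into a dict of lists and then rescans every group computing pairwise index differences; B is a single pass that keeps only the last index seen per value and folds the running minimal gap, with no second loop and no per-value index lists.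
import Mathlib
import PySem

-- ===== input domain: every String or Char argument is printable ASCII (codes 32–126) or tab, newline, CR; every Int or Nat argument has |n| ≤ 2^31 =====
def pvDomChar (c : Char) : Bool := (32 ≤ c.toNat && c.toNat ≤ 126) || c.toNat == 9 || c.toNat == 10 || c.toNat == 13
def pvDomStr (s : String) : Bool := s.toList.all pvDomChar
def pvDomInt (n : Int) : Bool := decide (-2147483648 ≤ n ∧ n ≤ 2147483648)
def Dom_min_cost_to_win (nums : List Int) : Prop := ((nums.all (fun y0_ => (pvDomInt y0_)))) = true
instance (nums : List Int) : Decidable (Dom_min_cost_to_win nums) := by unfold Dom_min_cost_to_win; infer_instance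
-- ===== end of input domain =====

-- B replaces A's group-all-indices-then-rescan-groups structure by a single pass that keeps
-- only the last index of each value and a running minimal gap (objective: simpler).

-- ===== PORT A =====
-- min(p): every call site passes a group of ≥ 2 indices, so p ≠ [] and Python's min returns; the .getD 0 default is never used
def pvMindiffA (l : List Int) : Int :=
  let p := (PySem.List.pyRange 0 ((l.length : Int) - 1) 1).foldl
    (fun p i => p ++ [|PySem.List.pyGetD l (i + 1) 0 - PySem.List.pyGetD l i 0|]) []
  (PySem.List.min? p id).getD 0

def min_cost_to_win (nums : List Int) : Int :=
  let d := (PySem.List.pyRange 0 (nums.length : Int) 1).foldl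
    (fun (d : PySem.Dict Int (List Int)) i =>
      -- nums[i]: i is drawn from range(len(nums)), so the index is always in range
      let x := PySem.List.pyGetD nums i 0
      if d.contains x then d.insert x (d.getD x [] ++ [i]) else d.insert x [i])
    PySem.Dict.empty
  let r := d.items.foldl
    (fun (s : Int × Int) kv =>
      if (1 : Int) < (kv.2.length : Int) then
        let x := pvMindiffA kv.2
        ((1 : Int), if x < s.2 then x else s.2)
      else s)
    (0, (nums.length : Int))
  if r.1 = 1 then r.2 + 1 else -1

-- ===== PORT B =====
def min_cost_to_win_alt (nums : List Int) : Int :=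
  let s := (PySem.List.enumerate nums).foldl
    (fun (s : PySem.Dict Int Int × Option Int) p =>
      let best := if s.1.contains p.2 then
          -- last[x]: the key is present on this branch
          let g := p.1 - s.1.getD p.2 0
          match s.2 with
          | none => some g
          | some b => if g < b then some g else some b
        else s.2
      (s.1.insert p.2 p.1, best))
    (PySem.Dict.empty, none)
  match s.2 with
  | none => -1
  | some b => b + 1

-- ===== PRECONDITION & SPEC =====
def Spec_min_cost_to_win (nums : List Int) (out : Int) : Prop := out = min_cost_to_win_alt nums
instance (nums : List Int) (out : Int) : Decidable (Spec_min_cost_to_win nums out) := by unfold Spec_min_cost_to_win; infer_instance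

-- ===== CLAIM (what is proved, stated in full; the proofs are below) =====
def Claim_equal_min_cost_to_win : Prop := ∀ (nums : List Int), Dom_min_cost_to_win nums → Spec_min_cost_to_win nums (min_cost_to_win nums)

-- ===== LEMMAS AND PROOFS =====

-- proof-side vocabulary: occurrence lists, adjacent gaps, and min-folds
def pvOcc (c : Int) (L : List Int) : List Int :=
  ((PySem.List.enumerate L).filter (fun p => p.2 == c)).map (fun p => p.1)

def pvAdj : List Int → List Int
  | a :: b :: t => (b - a) :: pvAdj (b :: t)
  | _ => []

def pvOf (o : Option Int) (g : Int) : Option Int := some (match o with | none => g | some b => min g b)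
def pvOfold (o : Option Int) (l : List Int) : Option Int := l.foldl pvOf o
def pvMfold (a : Int) (l : List Int) : Int := l.foldl (fun m g => min g m) a

def pvKeys (L : List Int) : List Int := PySem.Set.ofList L
def pvAllG (L : List Int) : List Int := (pvKeys L).flatMap (fun k => pvAdj (pvOcc k L))

def pvDictA (L : List Int) : PySem.Dict Int (List Int) :=
  (PySem.List.enumerate L).foldl (fun d p => d.modify p.2 [] (· ++ [p.1])) PySem.Dict.empty

def pvStepB (s : PySem.Dict Int Int × Option Int) (p : Int × Int) : PySem.Dict Int Int × Option Int :=
  let best := if s.1.contains p.2 then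
      let g := p.1 - s.1.getD p.2 0
      match s.2 with
      | none => some g
      | some b => if g < b then some g else some b
    else s.2
  (s.1.insert p.2 p.1, best)

lemma pv_enum_append (l1 l2 : List Int) (s : Int) :
    PySem.List.enumerate (l1 ++ l2) s = PySem.List.enumerate l1 s ++ PySem.List.enumerate l2 (s + l1.length) := by
  induction l1 generalizing s with
  | nil => simp [PySem.List.enumerate_nil]
  | cons x t ih => simp [PySem.List.enumerate_cons, ih, List.cons_append]; ring_nf

lemma pv_foldl_range_enum {α : Type} (g : α → Int → Int → α) :
    ∀ (post pre : List Int) (init : α),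
      (PySem.List.pyRange (pre.length : Int) ((pre.length : Int) + (post.length : Int)) 1).foldl
          (fun a i => g a i (PySem.List.pyGetD (pre ++ post) i 0)) init
        = (PySem.List.enumerate post (pre.length : Int)).foldl (fun a p => g a p.1 p.2) init := by
  intro post
  induction post with
  | nil =>
    intro pre init
    rw [show ((pre.length : Int) + (([] : List Int).length : Int)) = (pre.length : Int) by simp]
    rw [PySem.List.pyRange_one_eq_nil (le_refl _), PySem.List.enumerate_nil]
    rfl
  | cons x t ih =>
    intro pre init
    have hm : (pre.length : Int) < (pre.length : Int) + ((x :: t).length : Int) := by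
      simp only [List.length_cons]
      push_cast
      omega
    rw [PySem.List.pyRange_one_cons hm, List.foldl_cons, PySem.List.enumerate_cons, List.foldl_cons]
    have hget : PySem.List.pyGetD (pre ++ x :: t) (pre.length : Int) 0 = x := by
      rw [PySem.List.pyGetD_natCast]
      rw [List.getD_eq_getElem _ 0 (by simp)]
      simp
    rw [hget]
    have ihx := ih (pre ++ [x]) (g init (pre.length : Int) x)
    simp only [List.length_append, List.length_cons, List.length_nil, List.append_assoc,
      List.singleton_append] at ihx ⊢
    convert ihx using 2
    all_goals
      push_cast
      ring_nf

lemma pv_foldl_range_enum0 {α : Type} (g : α → Int → Int → α) (L : List Int) (init : α) :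
    (PySem.List.pyRange 0 (L.length : Int) 1).foldl
        (fun a i => g a i (PySem.List.pyGetD L i 0)) init
      = (PySem.List.enumerate L).foldl (fun a p => g a p.1 p.2) init := by
  simpa using pv_foldl_range_enum g L [] init

lemma pv_dictA_getD (L : List Int) (c : Int) : (pvDictA L).getD c [] = pvOcc c L := by
  unfold pvDictA pvOcc
  have hswap : (PySem.List.enumerate L).foldl (fun d p => d.modify p.2 [] (· ++ [p.1])) PySem.Dict.empty
      = ((PySem.List.enumerate L).map Prod.swap).foldl (fun d p => d.modify p.1 [] (· ++ [p.2])) PySem.Dict.empty := by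
    rw [List.foldl_map]
    rfl
  rw [hswap, PySem.Dict.getD_foldl_modify_append]
  simp only [PySem.Dict.getD_empty, List.nil_append, List.filter_map, List.map_map]
  simp only [Function.comp_def, Prod.fst_swap, Prod.snd_swap]

lemma pv_dictA_keys (L : List Int) : (pvDictA L).keys = pvKeys L := by
  unfold pvDictA pvKeys
  rw [PySem.Dict.keys_foldl_modify_key]
  rw [PySem.List.map_snd_enumerate, PySem.Dict.keys_empty, PySem.Set.update_nil_left]

lemma pv_dictA_items (L : List Int) :
    (pvDictA L).items = (pvKeys L).map (fun k => (k, pvOcc k L)) := by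
  have hnd : (pvDictA L).keys.Nodup := by
    rw [pv_dictA_keys]
    exact PySem.Set.nodup_ofList L
  rw [PySem.Dict.items_eq_map_keys (pvDictA L) hnd [], pv_dictA_keys]
  exact List.map_congr_left (fun k _ => by rw [pv_dictA_getD])

lemma pv_adj_length (l : List Int) : (pvAdj l).length = l.length - 1 := by
  induction l with
  | nil => simp [pvAdj]
  | cons a t ih =>
    cases t with
    | nil => simp [pvAdj]
    | cons b t' => simp [pvAdj] at ih ⊢; omega

lemma pv_adj_getElem (l : List Int) (i : Nat) (h : i + 1 < l.length) (h' : i < (pvAdj l).length) :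
    (pvAdj l)[i] = l[i + 1] - l[i] := by
  induction l generalizing i with
  | nil => simp at h
  | cons a t ih =>
    cases t with
    | nil => simp at h
    | cons b t' =>
      cases i with
      | zero => simp [pvAdj]
      | succ j =>
        simp only [pvAdj, List.getElem_cons_succ]
        exact ih j (by simpa using h) (by simpa [pvAdj] using h')

lemma pv_adj_append_singleton (l : List Int) (a : Int) :
    pvAdj (l ++ [a]) = pvAdj l ++ (match l.getLast? with | none => [] | some b => [a - b]) := by
  induction l with
  | nil => simp [pvAdj]
  | cons y t ih =>
    cases t with
    | nil => simp [pvAdj]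
    | cons z t' =>
      simp only [List.cons_append, pvAdj, List.getLast?_cons_cons]
      simpa using ih

lemma pv_mindiffA_p (l : List Int) (hp : List.Pairwise (· < ·) l) :
    (PySem.List.pyRange 0 ((l.length : Int) - 1) 1).foldl
        (fun p i => p ++ [|PySem.List.pyGetD l (i + 1) 0 - PySem.List.pyGetD l i 0|]) []
      = pvAdj l := by
  rw [PySem.List.foldl_append_singleton_eq_map]
  simp only [List.nil_append]
  apply List.ext_getElem
  · simp [PySem.List.length_pyRange_one, pv_adj_length]
  · intro i h1 h2
    simp only [List.getElem_map]
    rw [PySem.List.getElem_pyRange_one]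
    have hi : i < l.length - 1 := by
      simp [PySem.List.length_pyRange_one] at h1
      omega
    have hc1 : (0 : Int) + (i : Int) + 1 = ((i + 1 : Nat) : Int) := by push_cast; ring
    have hc0 : (0 : Int) + (i : Int) = ((i : Nat) : Int) := by ring
    rw [hc1, hc0, PySem.List.pyGetD_natCast, PySem.List.pyGetD_natCast]
    rw [List.getD_eq_getElem l 0 (by omega), List.getD_eq_getElem l 0 (by omega)]
    rw [pv_adj_getElem l i (by omega) h2]
    have hlt : l[i] < l[i + 1] :=
      List.pairwise_iff_getElem.mp hp i (i + 1) (by omega) (by omega) (by omega)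
    rw [abs_of_nonneg (by omega)]

lemma pv_min?_eq_ofold (p : List Int) : PySem.List.min? p id = pvOfold none p := by
  unfold PySem.List.min? pvOfold
  congr 1
  funext o g
  cases o with
  | none => rfl
  | some b => simp [pvOf, min_def]; split_ifs <;> simp <;> omega

lemma pv_ofold_some (l : List Int) : ∀ a : Int, pvOfold (some a) l = some (pvMfold a l) := by
  induction l with
  | nil => intro a; rfl
  | cons g t ih => intro a; simpa [pvOfold, pvMfold, pvOf] using ih (min g a)

lemma pv_ofold_cons (g : Int) (t : List Int) : pvOfold none (g :: t) = some (pvMfold g t) := by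
  have h : pvOfold none (g :: t) = pvOfold (some g) t := rfl
  rw [h, pv_ofold_some]

lemma pv_mfold_min (t : List Int) : ∀ a m : Int, pvMfold (min a m) t = min (pvMfold a t) m := by
  induction t with
  | nil => intro a m; rfl
  | cons g t ih =>
    intro a m
    have h1 : pvMfold (min a m) (g :: t) = pvMfold (min g (min a m)) t := rfl
    have h2 : pvMfold a (g :: t) = pvMfold (min g a) t := rfl
    rw [h1, h2, show min g (min a m) = min (min g a) m by rw [min_assoc], ih]

lemma pv_ofold_perm {l1 l2 : List Int} (h : l1.Perm l2) (o : Option Int) :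
    pvOfold o l1 = pvOfold o l2 := by
  letI : RightCommutative pvOf := ⟨by
    intro b a1 a2
    cases b <;> simp [pvOf] <;> [exact min_comm _ _; exact min_left_comm _ _ _]⟩
  exact h.foldl_eq o

lemma pv_occ_sublist (c : Int) (L : List Int) :
    (pvOcc c L).Sublist (PySem.List.pyRange 0 (L.length : Int) 1) := by
  have h1 : ((PySem.List.enumerate L).filter (fun p => p.2 == c)).Sublist (PySem.List.enumerate L) :=
    List.filter_sublist
  have h2 := h1.map (fun p : Int × Int => p.1)
  rw [PySem.List.map_fst_enumerate] at h2
  simpa [pvOcc] using h2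

lemma pv_occ_pairwise (c : Int) (L : List Int) : List.Pairwise (· < ·) (pvOcc c L) :=
  (PySem.List.pairwise_lt_pyRange_one 0 (L.length : Int)).sublist (pv_occ_sublist c L)

lemma pv_occ_bounds (c : Int) (L : List Int) {a : Int} (h : a ∈ pvOcc c L) :
    0 ≤ a ∧ a < (L.length : Int) := by
  have := (pv_occ_sublist c L).subset h
  rwa [PySem.List.mem_pyRange_one] at this

lemma pv_adj_mem_lt {l : List Int} {n : Int} (hp : List.Pairwise (· < ·) l)
    (hb : ∀ x ∈ l, 0 ≤ x ∧ x < n) : ∀ g ∈ pvAdj l, 0 < g ∧ g < n := by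
  induction l with
  | nil => simp [pvAdj]
  | cons a t ih =>
    cases t with
    | nil => simp [pvAdj]
    | cons b t' =>
      intro g hg
      have hab : a < b := (List.pairwise_cons.mp hp).1 b (by simp)
      have ha := hb a (by simp)
      have hbb := hb b (by simp)
      rcases hg with _ | hg'
      · omega
      · exact ih (List.pairwise_cons.mp hp).2 (fun x hx => hb x (List.mem_cons_of_mem _ hx)) g (by assumption)

lemma pv_allG_mem_lt (L : List Int) : ∀ g ∈ pvAllG L, g < (L.length : Int) := by
  intro g hg
  rcases List.mem_flatMap.mp hg with ⟨k, _, hk⟩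
  exact (pv_adj_mem_lt (pv_occ_pairwise k L) (fun x hx => pv_occ_bounds k L hx) g hk).2

lemma pv_occ_append (c x : Int) (L : List Int) :
    pvOcc c (L ++ [x]) = pvOcc c L ++ (if x = c then [(L.length : Int)] else []) := by
  unfold pvOcc
  rw [pv_enum_append]
  simp [PySem.List.enumerate_cons, PySem.List.enumerate_nil, List.filter_append]
  split_ifs with h <;> simp [h]

lemma pv_occ_eq_nil_iff (c : Int) (L : List Int) : pvOcc c L = [] ↔ c ∉ L := by
  unfold pvOcc
  rw [List.map_eq_nil_iff, List.filter_eq_nil_iff]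
  constructor
  · intro h hc
    have hc' : c ∈ (PySem.List.enumerate L).map (fun p => p.2) := by
      rw [PySem.List.map_snd_enumerate]; exact hc
    rcases List.mem_map.mp hc' with ⟨p, hp, hpc⟩
    exact h p hp (by simp [hpc])
  · intro h p hp hc
    apply h
    have : p.2 ∈ (PySem.List.enumerate L).map (fun p => p.2) := List.mem_map_of_mem hp
    rw [PySem.List.map_snd_enumerate] at this
    simpa [show p.2 = c by simpa using hc] using this

lemma pv_adj_eq_nil (l : List Int) (h : l.length ≤ 1) : pvAdj l = [] := by
  match l with
  | [] => rfl
  | [_] => rfl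
  | _ :: _ :: _ => simp at h

lemma pv_keys_append (L : List Int) (x : Int) :
    pvKeys (L ++ [x]) = if x ∈ L then pvKeys L else pvKeys L ++ [x] := by
  unfold pvKeys
  rw [PySem.Set.ofList_append_singleton]
  split_ifs with h
  · exact PySem.Set.add_of_mem (by rwa [PySem.Set.mem_ofList])
  · exact PySem.Set.add_of_not_mem (by rwa [PySem.Set.mem_ofList])

lemma pv_allG_append (L : List Int) (x : Int) :
    (pvAllG (L ++ [x])).Perm
      (pvAllG L ++ (pvOcc x L).getLast?.toList.map (fun b => (L.length : Int) - b)) := by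
  by_cases hx : x ∈ L
  · rcases hgl : (pvOcc x L).getLast? with _ | b
    · rw [List.getLast?_eq_none_iff] at hgl
      exact absurd ((pv_occ_eq_nil_iff x L).mp hgl) (by simpa using hx)
    · have hxk : x ∈ pvKeys L := by
        unfold pvKeys
        rw [PySem.Set.mem_ofList]
        exact hx
      obtain ⟨l1, l2, hsplit⟩ := List.append_of_mem hxk
      have hnd : (pvKeys L).Nodup := PySem.Set.nodup_ofList L
      rw [hsplit] at hnd
      have hx1 : x ∉ l1 := by
        intro h
        exact (List.disjoint_of_nodup_append hnd) h (by simp)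
      have hx2 : x ∉ l2 := by
        have := (List.nodup_append.mp hnd).2.1
        simp [List.nodup_cons] at this
        exact this.1
      have hne1 : ∀ k ∈ l1, pvOcc k (L ++ [x]) = pvOcc k L := by
        intro k hk
        rw [pv_occ_append, if_neg (by intro h; rw [← h] at hk; exact hx1 hk)]
        simp
      have hne2 : ∀ k ∈ l2, pvOcc k (L ++ [x]) = pvOcc k L := by
        intro k hk
        rw [pv_occ_append, if_neg (by intro h; rw [← h] at hk; exact hx2 hk)]
        simp
      have hmid : pvAdj (pvOcc x (L ++ [x])) = pvAdj (pvOcc x L) ++ [(L.length : Int) - b] := by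
        rw [pv_occ_append, if_pos rfl, pv_adj_append_singleton, hgl]
      unfold pvAllG
      rw [pv_keys_append, if_pos hx, hsplit]
      rw [List.flatMap_append, List.flatMap_cons, List.flatMap_append, List.flatMap_cons]
      have e1 : l1.flatMap (fun k => pvAdj (pvOcc k (L ++ [x]))) = l1.flatMap (fun k => pvAdj (pvOcc k L)) := by
        rw [List.flatMap_def, List.flatMap_def]
        exact congrArg List.flatten (List.map_congr_left (fun k hk => by rw [hne1 k hk]))
      have e2 : l2.flatMap (fun k => pvAdj (pvOcc k (L ++ [x]))) = l2.flatMap (fun k => pvAdj (pvOcc k L)) := by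
        rw [List.flatMap_def, List.flatMap_def]
        exact congrArg List.flatten (List.map_congr_left (fun k hk => by rw [hne2 k hk]))
      rw [e1, e2, hmid]
      simp only [Option.toList_some, List.map_cons, List.map_nil]
      have ha1 : l1.flatMap (fun k => pvAdj (pvOcc k L)) ++
            ((pvAdj (pvOcc x L) ++ [(L.length : Int) - b]) ++ l2.flatMap (fun k => pvAdj (pvOcc k L)))
          = l1.flatMap (fun k => pvAdj (pvOcc k L)) ++
            (pvAdj (pvOcc x L) ++ ([(L.length : Int) - b] ++ l2.flatMap (fun k => pvAdj (pvOcc k L)))) := by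
        simp [List.append_assoc]
      have ha2 : l1.flatMap (fun k => pvAdj (pvOcc k L)) ++
            (pvAdj (pvOcc x L) ++ l2.flatMap (fun k => pvAdj (pvOcc k L))) ++ [(L.length : Int) - b]
          = l1.flatMap (fun k => pvAdj (pvOcc k L)) ++
            (pvAdj (pvOcc x L) ++ (l2.flatMap (fun k => pvAdj (pvOcc k L)) ++ [(L.length : Int) - b])) := by
        simp [List.append_assoc]
      rw [ha1, ha2]
      exact (List.perm_append_comm.append_left _).append_left _
  · have hocc : pvOcc x L = [] := (pv_occ_eq_nil_iff x L).mpr hx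
    rw [hocc]
    simp only [List.getLast?_nil, Option.toList_none, List.map_nil, List.append_nil]
    unfold pvAllG
    rw [pv_keys_append, if_neg hx, List.flatMap_append, List.flatMap_cons]
    have e1 : (pvKeys L).flatMap (fun k => pvAdj (pvOcc k (L ++ [x]))) = (pvKeys L).flatMap (fun k => pvAdj (pvOcc k L)) := by
      rw [List.flatMap_def, List.flatMap_def]
      refine congrArg List.flatten (List.map_congr_left (fun k hk => ?_))
      have hkL : k ∈ L := by
        rw [← PySem.Set.mem_ofList]
        exact hk
      rw [pv_occ_append, if_neg (by intro h; rw [← h] at hkL; exact hx hkL)]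
      simp
    have e2 : pvAdj (pvOcc x (L ++ [x])) = [] := by
      rw [pv_occ_append, if_pos rfl, hocc]
      simp [pvAdj]
    rw [e1, e2]
    simp

lemma pv_phase2 (L : List Int) : ∀ (ks : List Int) (f0 m0 : Int),
    ks.foldl (fun (s : Int × Int) k =>
        if (1 : Int) < ((pvOcc k L).length : Int) then
          ((1 : Int), if pvMindiffA (pvOcc k L) < s.2 then pvMindiffA (pvOcc k L) else s.2)
        else s) (f0, m0)
      = (if ks.any (fun k => decide ((1 : Int) < ((pvOcc k L).length : Int))) then 1 else f0,
         ks.foldl (fun m k =>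
            if (1 : Int) < ((pvOcc k L).length : Int) then
              (if pvMindiffA (pvOcc k L) < m then pvMindiffA (pvOcc k L) else m)
            else m) m0) := by
  intro ks
  induction ks with
  | nil => intro f0 m0; simp
  | cons k t ih =>
    intro f0 m0
    by_cases h : (1 : Int) < ((pvOcc k L).length : Int)
    · simp only [List.foldl_cons, List.any_cons, if_pos h, decide_eq_true h]
      rw [ih]
      simp
    · simp only [List.foldl_cons, List.any_cons, if_neg h]
      rw [ih]
      simp [h]

lemma pv_mindiffA_eq (c : Int) (L : List Int) (g : Int) (t : List Int)
    (h : pvAdj (pvOcc c L) = g :: t) : pvMindiffA (pvOcc c L) = pvMfold g t := by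
  have hpp := pv_mindiffA_p (pvOcc c L) (pv_occ_pairwise c L)
  simp only [pvMindiffA]
  rw [hpp, h, pv_min?_eq_ofold, pv_ofold_cons]
  rfl

lemma pv_keysfold (L : List Int) : ∀ (ks : List Int) (m0 : Int),
    ks.foldl (fun m k =>
        if (1 : Int) < ((pvOcc k L).length : Int) then
          (if pvMindiffA (pvOcc k L) < m then pvMindiffA (pvOcc k L) else m)
        else m) m0
      = pvMfold m0 (ks.flatMap (fun k => pvAdj (pvOcc k L))) := by
  intro ks
  induction ks with
  | nil => intro m0; simp [pvMfold]
  | cons k t ih =>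
    intro m0
    rw [List.flatMap_cons, List.foldl_cons]
    show _ = pvMfold m0 (pvAdj (pvOcc k L) ++ t.flatMap fun k => pvAdj (pvOcc k L))
    unfold pvMfold
    rw [List.foldl_append]
    by_cases hdup : (1 : Int) < ((pvOcc k L).length : Int)
    · cases hadj : pvAdj (pvOcc k L) with
      | nil =>
        have := pv_adj_length (pvOcc k L)
        rw [hadj] at this
        simp at this hdup
        omega
      | cons g t0 =>
        rw [if_pos hdup, pv_mindiffA_eq k L g t0 hadj, ih]
        unfold pvMfold
        congr 1
        rw [List.foldl_cons]
        have h1 : (List.foldl (fun m g => min g m) (min g m0) t0) = min (List.foldl (fun m g => min g m) g t0) m0 :=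
          pv_mfold_min t0 g m0
        rw [h1]
        rw [min_def]
        split_ifs <;> omega
    · rw [if_neg hdup, pv_adj_eq_nil (pvOcc k L) (by omega), ih]
      rfl

lemma pv_any_iff (L ks : List Int) :
    (ks.any (fun k => decide ((1 : Int) < ((pvOcc k L).length : Int))) = true)
      ↔ ks.flatMap (fun k => pvAdj (pvOcc k L)) ≠ [] := by
  rw [List.any_eq_true]
  rw [Ne, List.flatMap_eq_nil_iff]
  constructor
  · rintro ⟨k, hk, hdup⟩ hnil
    have h0 := hnil k hk
    have hlen := pv_adj_length (pvOcc k L)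
    rw [h0] at hlen
    simp at hdup hlen
    omega
  · intro h
    by_contra hc
    push Not at hc
    apply h
    intro k hk
    have := hc k hk
    simp at this
    exact pv_adj_eq_nil _ (by exact_mod_cast this)

lemma pv_A_eq (L : List Int) :
    min_cost_to_win L = match pvOfold none (pvAllG L) with | none => -1 | some b => b + 1 := by
  have hd : (PySem.List.pyRange 0 (L.length : Int) 1).foldl
      (fun (d : PySem.Dict Int (List Int)) i =>
        let x := PySem.List.pyGetD L i 0
        if d.contains x then d.insert x (d.getD x [] ++ [i]) else d.insert x [i])
      PySem.Dict.empty = pvDictA L := by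
    have h1 := pv_foldl_range_enum0
      (fun (d : PySem.Dict Int (List Int)) i x =>
        if d.contains x then d.insert x (d.getD x [] ++ [i]) else d.insert x [i]) L PySem.Dict.empty
    rw [h1]
    unfold pvDictA
    congr 1
    funext d p
    by_cases h : d.contains p.2
    · rw [if_pos h]
      rfl
    · rw [if_neg h]
      have hD : d.getD p.2 ([] : List Int) = [] :=
        PySem.Dict.getD_of_not_contains d [] (by simpa using h)
      show _ = d.insert p.2 (d.getD p.2 [] ++ [p.1])
      rw [hD]
      rfl
  unfold min_cost_to_win
  simp only [hd]
  rw [pv_dictA_items, List.foldl_map]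
  have h2 := pv_phase2 L (pvKeys L) 0 (L.length : Int)
  simp only []
  rw [h2, pv_keysfold]
  have hAll : (pvKeys L).flatMap (fun k => pvAdj (pvOcc k L)) = pvAllG L := rfl
  rw [hAll]
  by_cases hany : (pvKeys L).any (fun k => decide ((1 : Int) < ((pvOcc k L).length : Int))) = true
  · rw [if_pos hany]
    have hne : pvAllG L ≠ [] := by
      rw [← hAll]
      exact (pv_any_iff L (pvKeys L)).mp hany
    cases hG : pvAllG L with
    | nil => exact absurd hG hne
    | cons g0 t =>
      have hlt : g0 < (L.length : Int) := pv_allG_mem_lt L g0 (by rw [hG]; simp)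
      have hmf : pvMfold (L.length : Int) (g0 :: t) = pvMfold g0 t := by
        show List.foldl (fun m g => min g m) (min g0 (L.length : Int)) t = _
        rw [min_eq_left (le_of_lt hlt)]
        rfl
      show (if (1 : Int) = 1 then pvMfold (L.length : Int) (g0 :: t) + 1 else -1)
        = match pvOfold none (g0 :: t) with | none => (-1 : Int) | some b => b + 1
      rw [if_pos rfl, hmf, pv_ofold_cons]
  · rw [if_neg hany]
    have hnil : pvAllG L = [] := by
      rw [← hAll]
      by_contra hc
      exact hany ((pv_any_iff L (pvKeys L)).mpr hc)
    rw [hnil]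
    norm_num
    rfl

lemma pv_B_inv (L : List Int) :
    (∀ x : Int, ((PySem.List.enumerate L).foldl pvStepB (PySem.Dict.empty, none)).1.get? x
        = (pvOcc x L).getLast?) ∧
    ((PySem.List.enumerate L).foldl pvStepB (PySem.Dict.empty, none)).2 = pvOfold none (pvAllG L) := by
  induction L using List.reverseRecOn with
  | nil =>
    constructor
    · intro x
      simp [PySem.List.enumerate_nil, pvOcc, PySem.Dict.get?_empty]
    · rfl
  | append_singleton L x ih =>
    obtain ⟨ih1, ih2⟩ := ih
    rw [pv_enum_append L [x] 0, List.foldl_append]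
    have henum1 : PySem.List.enumerate [x] (0 + (L.length : Int)) = [((L.length : Int), x)] := by
      simp [PySem.List.enumerate_cons, PySem.List.enumerate_nil]
    rw [henum1]
    set s := (PySem.List.enumerate L).foldl pvStepB (PySem.Dict.empty, none) with hs
    have hcont : s.1.contains x = (pvOcc x L).getLast?.isSome := by
      rw [PySem.Dict.contains_eq_isSome_get?, ih1 x]
    by_cases hx : x ∈ L
    · rcases hgl : (pvOcc x L).getLast? with _ | b
      · rw [List.getLast?_eq_none_iff] at hgl
        exact absurd ((pv_occ_eq_nil_iff x L).mp hgl) (by simpa using hx)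
      · have hct : s.1.contains x = true := by rw [hcont, hgl]; rfl
        have hgd : s.1.getD x 0 = b := by
          rw [PySem.Dict.getD_eq_get?_getD, ih1 x, hgl]
          rfl
        constructor
        · intro y
          show (s.1.insert x (L.length : Int)).get? y = _
          rw [PySem.Dict.get?_insert]
          by_cases hyx : y = x
          · rw [if_pos hyx, hyx, pv_occ_append, if_pos rfl, List.getLast?_concat]
          · rw [if_neg hyx, ih1 y, pv_occ_append, if_neg (fun h => hyx (h.symm)), List.append_nil]
        · show (if s.1.contains x then _ else s.2) = _
          rw [hct, if_pos rfl]
          have hperm := pv_ofold_perm (pv_allG_append L x) (none : Option Int)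
          rw [hperm, hgl]
          simp only [Option.toList_some, List.map_cons, List.map_nil]
          unfold pvOfold
          rw [List.foldl_append]
          show (match s.2 with
            | none => some ((L.length : Int) - s.1.getD x 0)
            | some b => if (L.length : Int) - s.1.getD x 0 < b then some ((L.length : Int) - s.1.getD x 0) else some b)
            = pvOf (List.foldl pvOf none (pvAllG L)) ((L.length : Int) - b)
          rw [show List.foldl pvOf none (pvAllG L) = s.2 from (ih2).symm, hgd]
          rcases s.2 with _ | b0
          · rfl
          · simp only [pvOf, min_def]
            split_ifs <;> simp <;> omega
    · have hocc : pvOcc x L = [] := (pv_occ_eq_nil_iff x L).mpr hx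
      have hct : s.1.contains x = false := by rw [hcont, hocc]; rfl
      constructor
      · intro y
        show (s.1.insert x (L.length : Int)).get? y = _
        rw [PySem.Dict.get?_insert]
        by_cases hyx : y = x
        · rw [if_pos hyx, hyx, pv_occ_append, if_pos rfl, hocc, List.nil_append, List.getLast?_singleton]
        · rw [if_neg hyx, ih1 y, pv_occ_append, if_neg (fun h => hyx (h.symm)), List.append_nil]
      · show (if s.1.contains x then _ else s.2) = _
        rw [hct, if_neg (by simp)]
        have hperm := pv_ofold_perm (pv_allG_append L x) (none : Option Int)
        rw [hperm, hocc]
        simpa using ih2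

lemma pv_B_eq (L : List Int) :
    min_cost_to_win_alt L = match pvOfold none (pvAllG L) with | none => -1 | some b => b + 1 := by
  show (match ((PySem.List.enumerate L).foldl pvStepB (PySem.Dict.empty, none)).2 with
    | none => (-1 : Int)
    | some b => b + 1) = _
  rw [(pv_B_inv L).2]

-- ===== VERDICT (by name: the statement is the Claim_ definition above) =====
theorem min_cost_to_win_spec : Claim_equal_min_cost_to_win := by
  intro nums _
  unfold Spec_min_cost_to_win
  rw [pv_A_eq, pv_B_eq]
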